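-- pv_equiv track=rewrite | github.com/mpavezb/ltm_samples | src/ltm_samples/benchmarking/suite.py | generate_checkpoints
-- ===== SOURCE A (Python) =====
-- def generate_checkpoints(max_value, max_delta):
--     start = 10
--     delta = 10
--     value = start
--     keep_increasing_delta = True
--     checkpoints = []
--     while value <= max_value:
--         checkpoints.append(value)
--         if keep_increasing_delta and value >= 10*delta:
--             if (10*delta <= max_delta):
--                 delta = 10*delta
--             else:
--                 keep_increasing_delta = False
--         value += delta
--     return checkpoints
-- ===== SOURCE B (Python) =====
-- def generate_checkpoints(max_value, max_delta):
--     # stage-wise: each power-of-ten decade is emitted as one range() block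
--     checkpoints = []
--     value, step = 10, 10
--     while 10 * step <= max_delta and 10 * step <= max_value:
--         checkpoints.extend(range(value, 10 * step + 1, step))
--         value, step = 20 * step, 10 * step
--     checkpoints.extend(range(value, max_value + 1, step))
--     return checkpoints
-- ===== Notes on version B (the rewrite author's own statement) =====
-- stated objective: simpler
-- what changed: Replaces the single while-loop with mutable delta and a keep_increasing flag by a stage-wise decomposition: one range() block per power-of-ten decade while the next step is allowed, then one final range() block with the last step.
import Mathlib
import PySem

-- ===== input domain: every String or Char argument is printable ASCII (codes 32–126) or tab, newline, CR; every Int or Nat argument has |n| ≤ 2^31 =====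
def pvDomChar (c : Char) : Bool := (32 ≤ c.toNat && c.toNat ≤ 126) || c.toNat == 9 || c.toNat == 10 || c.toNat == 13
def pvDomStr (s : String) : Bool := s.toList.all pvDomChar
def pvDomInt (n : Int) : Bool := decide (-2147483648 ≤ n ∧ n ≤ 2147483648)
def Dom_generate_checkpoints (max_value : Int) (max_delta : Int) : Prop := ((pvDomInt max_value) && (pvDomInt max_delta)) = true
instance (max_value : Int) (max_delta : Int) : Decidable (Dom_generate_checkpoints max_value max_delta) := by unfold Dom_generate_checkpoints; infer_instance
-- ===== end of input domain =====

-- B replaces A's single flag-driven loop by one range() block per power-of-ten stage (simpler decomposition); return value proved identical.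

-- ===== PORT A =====
-- A's while loop, step for step; state = (delta, value, keep_increasing_delta, checkpoints).
-- The '0 < delta' conjunct is a totality guard only (delta starts at 10 and is only ever multiplied by 10).
def pvLoopA (max_value max_delta : Int) (delta value : Int) (keep : Bool) (checkpoints : List Int) : List Int :=
  if h : value ≤ max_value ∧ 0 < delta then
    let checkpoints' := checkpoints ++ [value]
    if keep ∧ value ≥ 10 * delta then
      if 10 * delta ≤ max_delta then
        pvLoopA max_value max_delta (10 * delta) (value + 10 * delta) keep checkpoints'
      else
        pvLoopA max_value max_delta delta (value + delta) false checkpoints'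
    else
      pvLoopA max_value max_delta delta (value + delta) keep checkpoints'
  else checkpoints
termination_by (max_value + 1 - value).toNat
decreasing_by all_goals omega

def generate_checkpoints (max_value : Int) (max_delta : Int) : List Int :=
  pvLoopA max_value max_delta 10 10 true []

-- ===== PORT B =====
-- B's stage loop; each iteration extends by range(value, 10*step+1, step).
-- The '0 < step' conjunct is a totality guard only (step starts at 10 and is only ever multiplied by 10).
def pvLoopB (max_value max_delta : Int) (value step : Int) (checkpoints : List Int) : List Int :=
  if h : 10 * step ≤ max_delta ∧ 10 * step ≤ max_value ∧ 0 < step then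
    pvLoopB max_value max_delta (20 * step) (10 * step)
      (checkpoints ++ PySem.List.pyRange value (10 * step + 1) step)
  else checkpoints ++ PySem.List.pyRange value (max_value + 1) step
termination_by (max_delta - step).toNat
decreasing_by omega

def generate_checkpoints_alt (max_value : Int) (max_delta : Int) : List Int :=
  pvLoopB max_value max_delta 10 10 []

-- ===== PRECONDITION & SPEC =====
def Spec_generate_checkpoints (max_value : Int) (max_delta : Int) (out : List Int) : Prop := out = generate_checkpoints_alt max_value max_delta
instance (max_value : Int) (max_delta : Int) (out : List Int) : Decidable (Spec_generate_checkpoints max_value max_delta out) := by unfold Spec_generate_checkpoints; infer_instance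

-- ===== CLAIM (what is proved, stated in full; the proofs are below) =====
def Claim_equal_generate_checkpoints : Prop := ∀ (max_value : Int) (max_delta : Int), Dom_generate_checkpoints max_value max_delta → Spec_generate_checkpoints max_value max_delta (generate_checkpoints max_value max_delta)

-- ===== LEMMAS AND PROOFS =====

-- pyRange induction forms for a general positive step
lemma pyRange_nil_of_pos {a b s : Int} (hs : 0 < s) (h : b ≤ a) :
    PySem.List.pyRange a b s = [] := by
  rw [PySem.List.pyRange_of_pos _ _ hs]
  simp [show ¬ a < b by omega]

lemma pyRange_cons_of_pos {a b s : Int} (hs : 0 < s) (h : a < b) :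
    PySem.List.pyRange a b s = a :: PySem.List.pyRange (a + s) b s := by
  rw [PySem.List.pyRange_of_pos _ _ hs, PySem.List.pyRange_of_pos _ _ hs]
  have key : (b - a + s - 1) / s = (b - (a + s) + s - 1) / s + 1 := by
    have := Int.add_mul_ediv_right (b - (a + s) + s - 1) 1 (show s ≠ 0 by omega)
    have e : b - (a + s) + s - 1 + 1 * s = b - a + s - 1 := by ring
    rw [e] at this; omega
  by_cases hab : a + s < b
  · have hnn : 0 ≤ (b - (a + s) + s - 1) / s :=
      Int.ediv_nonneg (by omega) (by omega)
    rw [if_pos h, if_pos hab, key,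
      show ((b - (a + s) + s - 1) / s + 1).toNat = ((b - (a + s) + s - 1) / s).toNat + 1 by omega,
      List.range_succ_eq_map]
    simp only [List.map_cons, List.map_map]
    refine List.cons_eq_cons.mpr ⟨by push_cast; ring, ?_⟩
    apply List.map_congr_left
    intro k _
    simp only [Function.comp]
    push_cast; ring
  · -- one element left: a < b ≤ a + s
    have h1 : (b - a + s - 1) / s = 1 := by
      have hge : 1 ≤ (b - a + s - 1) / s := by
        rw [Int.le_ediv_iff_mul_le hs]; omega
      have hlt : (b - a + s - 1) / s < 2 := by
        rw [Int.ediv_lt_iff_lt_mul hs]; omega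
      omega
    rw [if_pos h, if_neg hab, h1]
    simp

-- Tail lemma: once the stage structure is spent (flag off, next bump forbidden, or the
-- boundary is unreachable), A's loop emits exactly range(value, max_value+1, delta).
lemma loopA_tail (max_value max_delta : Int) :
    ∀ (delta value : Int) (keep : Bool) (acc : List Int), 0 < delta →
    (keep = false ∨ max_delta < 10 * delta ∨ max_value < 10 * delta) →
    pvLoopA max_value max_delta delta value keep acc
      = acc ++ PySem.List.pyRange value (max_value + 1) delta := by
  intro delta value keep acc hd H
  by_cases hle : value ≤ max_value
  · rw [pvLoopA, dif_pos ⟨hle, hd⟩]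
    have hcons : PySem.List.pyRange value (max_value + 1) delta
        = value :: PySem.List.pyRange (value + delta) (max_value + 1) delta :=
      pyRange_cons_of_pos hd (by omega)
    by_cases hk : keep = true
    · subst hk
      by_cases hbig : value ≥ 10 * delta
      · have hmd : max_delta < 10 * delta := by
          rcases H with h | h | h
          · simp at h
          · exact h
          · omega
        rw [if_pos ⟨rfl, hbig⟩, if_neg (by omega),
          loopA_tail max_value max_delta delta (value + delta) false (acc ++ [value]) hd (Or.inl rfl), hcons]
        simp
      · rw [if_neg (by simp [hbig]),
          loopA_tail max_value max_delta delta (value + delta) true (acc ++ [value]) hd H, hcons]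
        simp
    · simp only [Bool.not_eq_true] at hk
      rw [if_neg (by simp [hk]),
        loopA_tail max_value max_delta delta (value + delta) keep (acc ++ [value]) hd (Or.inl hk), hcons]
      simp
  · rw [pvLoopA, dif_neg (by omega), pyRange_nil_of_pos hd (by omega)]
    simp
termination_by delta value => (max_value + 1 - value).toNat
decreasing_by all_goals omega

-- Stage walk: with the flag on and the next bump allowed and reachable, A walks the
-- current decade (ending at the boundary 10*delta, appended under the old delta) and
-- re-enters with delta' = 10*delta, value' = 20*delta.
lemma loopA_stage (max_value max_delta : Int) (delta : Int) (hd : 0 < delta)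
    (hmd : 10 * delta ≤ max_delta) (hmv : 10 * delta ≤ max_value) :
    ∀ (value : Int) (acc : List Int), value ≤ 10 * delta → delta ∣ value →
    pvLoopA max_value max_delta delta value true acc
      = pvLoopA max_value max_delta (10 * delta) (20 * delta) true
          (acc ++ PySem.List.pyRange value (10 * delta + 1) delta) := by
  intro value acc hub hdvd
  rw [show PySem.List.pyRange value (10 * delta + 1) delta
      = value :: PySem.List.pyRange (value + delta) (10 * delta + 1) delta
      from pyRange_cons_of_pos hd (by omega)]
  rw [pvLoopA, dif_pos ⟨by omega, hd⟩]
  by_cases hb : value = 10 * delta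
  · subst hb
    rw [if_pos ⟨rfl, by omega⟩, if_pos hmd,
      pyRange_nil_of_pos hd (by omega)]
    simp [show (10:Int) * delta + 10 * delta = 20 * delta by ring]
  · have hlt : value < 10 * delta := by omega
    rw [if_neg (by simp; omega)]
    have hdvd' : delta ∣ value + delta := Dvd.dvd.add hdvd ⟨1, by ring⟩
    have hub' : value + delta ≤ 10 * delta := by
      rcases hdvd with ⟨k, rfl⟩
      have : k < 10 := by nlinarith
      have : k + 1 ≤ 10 := by omega
      calc delta * k + delta = delta * (k + 1) := by ring
        _ ≤ delta * 10 := by exact mul_le_mul_of_nonneg_left (by omega) (by omega)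
        _ = 10 * delta := by ring
    rw [loopA_stage max_value max_delta delta hd hmd hmv (value + delta) (acc ++ [value]) hub' hdvd']
    simp
termination_by value acc => (10 * delta - value).toNat
decreasing_by omega

-- Main correspondence: A's loop (flag on, invariants of the stage entry) = B's loop.
lemma loopA_eq_loopB (max_value max_delta : Int) :
    ∀ (delta value : Int) (acc : List Int), 0 < delta → delta ∣ value → value ≤ 10 * delta →
    pvLoopA max_value max_delta delta value true acc
      = pvLoopB max_value max_delta value delta acc := by
  intro delta value acc hd hdvd hub
  rw [pvLoopB]
  by_cases hc : 10 * delta ≤ max_delta ∧ 10 * delta ≤ max_value ∧ 0 < delta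
  · rw [dif_pos hc,
      loopA_stage max_value max_delta delta hd hc.1 hc.2.1 value acc hub hdvd,
      loopA_eq_loopB max_value max_delta (10 * delta) (20 * delta) _ (by omega) ⟨2, by ring⟩ (by omega)]
  · rw [dif_neg hc]
    exact loopA_tail max_value max_delta delta value true acc hd (by omega)
termination_by delta value acc => (max_delta - delta).toNat
decreasing_by omega

-- ===== VERDICT (by name: the statement is the Claim_ definition above) =====
theorem generate_checkpoints_spec : Claim_equal_generate_checkpoints := by
  intro max_value max_delta _
  unfold Spec_generate_checkpoints generate_checkpoints generate_checkpoints_alt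
  exact loopA_eq_loopB max_value max_delta 10 10 [] (by omega) ⟨1, by ring⟩ (by omega)
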